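-- pv_equiv track=rewrite | github.com/juliangonend/Prog1_JulianGon_B | tp/func_tp8.py | replicate_list
-- ===== SOURCE A (Python) =====
-- def replicate_list(arr,new_arr,i):
--     len_arr=len(arr)
--     if len_arr==0:
--      return new_arr
--     else:
--         number=arr.pop(0)
--         new_arr.extend([number]*i)
--
--         return replicate_list(arr,new_arr,i)
-- ===== SOURCE B (Python) =====
-- def replicate_list(arr, new_arr, i):
--     # Build the whole replicated tail in one comprehension, then drain arr
--     # (matching A's side effect of emptying it) and append the tail.
--     tail = [x for x in arr for _ in range(i)]
--     del arr[:]
--     new_arr.extend(tail)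
--     return new_arr
-- ===== Notes on version B (the rewrite author's own statement) =====
-- stated objective: simpler
-- what changed: Replaced A's tail recursion (pop(0) + extend per step) with a single flat comprehension that builds the whole replicated tail at once, then drains arr and appends the tail; no recursion and no repeated pop(0) front-shifting.
import Mathlib
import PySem

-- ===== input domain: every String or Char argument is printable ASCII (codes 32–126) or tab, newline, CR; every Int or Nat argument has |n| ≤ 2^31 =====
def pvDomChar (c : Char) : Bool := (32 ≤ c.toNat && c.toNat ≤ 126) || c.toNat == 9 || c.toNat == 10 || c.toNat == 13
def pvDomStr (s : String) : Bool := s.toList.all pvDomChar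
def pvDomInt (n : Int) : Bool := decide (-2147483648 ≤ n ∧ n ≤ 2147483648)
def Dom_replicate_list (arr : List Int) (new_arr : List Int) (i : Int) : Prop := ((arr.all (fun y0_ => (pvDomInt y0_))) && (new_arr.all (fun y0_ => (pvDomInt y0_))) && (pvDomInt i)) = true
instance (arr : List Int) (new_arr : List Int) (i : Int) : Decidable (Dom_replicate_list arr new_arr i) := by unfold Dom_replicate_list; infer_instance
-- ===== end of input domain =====

-- B builds the whole replicated tail in one comprehension and appends it once, replacing A's
-- recursion; same return value. Both Pythons mutate arr (emptied) and new_arr (extended)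
-- identically; the Lean equivalence is about the return value.

-- ===== PORT A =====
-- A: if arr is empty return new_arr, else pop the head, extend new_arr with [number]*i, recurse.
-- [number]*i with i ≤ 0 is []: List.replicate i.toNat matches Python's clamping of * exactly.
def replicate_list (arr : List Int) (new_arr : List Int) (i : Int) : List Int :=
  match arr with
  | [] => new_arr
  | number :: rest => replicate_list rest (new_arr ++ List.replicate i.toNat number) i

-- ===== PORT B =====
-- B: tail = [x for x in arr for _ in range(i)] (a flatMap of constant-value ranges);
-- return new_arr with tail appended. range(i) with i ≤ 0 is empty, matching i.toNat.
def replicate_list_alt (arr : List Int) (new_arr : List Int) (i : Int) : List Int :=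
  new_arr ++ arr.flatMap (fun x => (PySem.List.pyRange 0 i 1).map (fun _ => x))

-- ===== PRECONDITION & SPEC =====
def Spec_replicate_list (arr : List Int) (new_arr : List Int) (i : Int) (out : List Int) : Prop := out = replicate_list_alt arr new_arr i
instance (arr : List Int) (new_arr : List Int) (i : Int) (out : List Int) : Decidable (Spec_replicate_list arr new_arr i out) := by unfold Spec_replicate_list; infer_instance

-- ===== CLAIM (what is proved, stated in full; the proofs are below) =====
def Claim_equal_replicate_list : Prop := ∀ (arr : List Int) (new_arr : List Int) (i : Int), Dom_replicate_list arr new_arr i → Spec_replicate_list arr new_arr i (replicate_list arr new_arr i)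

-- ===== LEMMAS AND PROOFS =====
theorem pyRange_const_map (i : Int) (x : Int) :
    (PySem.List.pyRange 0 i 1).map (fun _ => x) = List.replicate i.toNat x := by
  rw [PySem.List.pyRange_one]
  simp [List.map_map, List.eq_replicate_iff]

theorem replicate_list_eq_alt (arr new_arr : List Int) (i : Int) :
    replicate_list arr new_arr i = replicate_list_alt arr new_arr i := by
  induction arr generalizing new_arr with
  | nil => simp [replicate_list, replicate_list_alt]
  | cons h t ih =>
      rw [replicate_list, ih]
      simp only [replicate_list_alt, List.flatMap_cons, pyRange_const_map, List.append_assoc]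

-- ===== VERDICT (by name: the statement is the Claim_ definition above) =====
theorem replicate_list_spec : Claim_equal_replicate_list := by
  intro arr new_arr i _
  exact replicate_list_eq_alt arr new_arr i
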